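-- pv_equiv track=rewrite | github.com/lcubrilo/Social-Nets-project | Clusters.py | iterateThruComponentNames
-- ===== SOURCE A (Python) =====
-- def iterateThruComponentNames(name):
--     def incChar(char):
--         num = ord(char) - ord("A") + 1
--         return chr(num % 26 + ord("A"))
--     counter = 0
--     res = ""
--     while True:
--         counter -= 1
--         char = name[counter]
--         res = incChar(char) + res
--         if res[0] != "A":
--             return name[:counter] + res
--         if counter == -len(name):
--             return "A" + res
-- ===== SOURCE B (Python) =====
-- def iterateThruComponentNames(name):
--     def incChar(char):
--         num = ord(char) - ord("A") + 1
--         return chr(num % 26 + ord("A"))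
--     chars = list(name)
--     i = len(chars) - 1
--     # scan leftward over the positions that carry (their incremented char is 'A')
--     while i >= 0 and incChar(chars[i]) == "A":
--         chars[i] = "A"
--         i -= 1
--     if i < 0:
--         return "A" * (len(name) + 1)
--     chars[i] = incChar(chars[i])
--     return "".join(chars)
-- ===== Notes on version B (the rewrite author's own statement) =====
-- stated objective: simpler
-- what changed: Instead of building the result string right-to-left inside an infinite loop with negative indices and slicing, B scans an index leftward over the carrying positions of a char list, sets them to 'A', increments the first non-carrying char in place and joins; overflow is a direct 'A'*(len+1).
-- crash fix: On the empty string A raises IndexError (name[-1]); B returns 'A', the natural successor of the empty column name. — e.g. on iterateThruComponentNames(""): A raises IndexError, B returns "A"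
import Mathlib
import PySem

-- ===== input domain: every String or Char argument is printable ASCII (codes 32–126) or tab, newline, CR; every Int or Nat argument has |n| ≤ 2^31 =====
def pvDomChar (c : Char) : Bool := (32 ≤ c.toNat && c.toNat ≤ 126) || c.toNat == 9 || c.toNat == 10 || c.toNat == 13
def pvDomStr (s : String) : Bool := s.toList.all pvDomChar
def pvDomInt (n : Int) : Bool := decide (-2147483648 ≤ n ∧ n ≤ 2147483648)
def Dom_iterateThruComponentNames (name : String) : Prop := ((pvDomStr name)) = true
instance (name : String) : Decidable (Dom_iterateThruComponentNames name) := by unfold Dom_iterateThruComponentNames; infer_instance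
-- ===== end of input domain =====

-- B replaces A's infinite loop (prepend to res, check res[0], negative slicing) by a
-- leftward scan over the carrying positions of a char list; objective: simpler.
-- ===== PORT A =====
-- incChar: chr((ord(char) - ord('A') + 1) % 26 + ord('A')); PySem.Int.mod is Python's %
def pvIncCharA (c : Char) : Char :=
  Char.ofNat (PySem.Int.mod ((c.toNat : Int) - 65 + 1) 26 + 65).toNat

-- A's 'while True' loop; it returns within len(name) iterations, so fuel = len(name)
def pvLoopA (l : List Char) (counter : Int) (res : List Char) : Nat → List Char
  | 0 => res  -- unreachable for nonempty l (Pre_ excludes the empty string)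
  | fuel + 1 =>
    let counter := counter - 1
    match PySem.List.pyGet? l counter with
    | none => res  -- IndexError: excluded by Pre_
    | some ch =>
      let res := pvIncCharA ch :: res
      if res.headD ' ' ≠ 'A' then PySem.List.slice l none (some counter) ++ res
      else if counter = -(l.length : Int) then 'A' :: res
      else pvLoopA l counter res fuel

def iterateThruComponentNames (name : String) : String :=
  String.ofList (pvLoopA name.toList 0 [] name.toList.length)

-- ===== PORT B =====
def pvIncCharB (c : Char) : Char :=
  Char.ofNat (PySem.Int.mod ((c.toNat : Int) - 65 + 1) 26 + 65).toNat

-- B's leftward scan 'while i >= 0 and incChar(chars[i]) == "A"': structural recursion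
-- on the reversed char list; none = the scan ran off the left end (overflow)
def pvCarryB : List Char → Option (List Char)
  | [] => none
  | c :: rest =>
    if pvIncCharB c = 'A' then (pvCarryB rest).map (fun r => 'A' :: r)
    else some (pvIncCharB c :: rest)

def iterateThruComponentNames_alt (name : String) : String :=
  match pvCarryB name.toList.reverse with
  | none => String.ofList (List.replicate (name.toList.length + 1) 'A')
  | some r => String.ofList r.reverse

-- ===== PRECONDITION & SPEC =====
-- Pre_ excludes only the empty string, on which A raises IndexError (name[-1]).
def Pre_iterateThruComponentNames (name : String) : Prop := name ≠ ""
instance (name : String) : Decidable (Pre_iterateThruComponentNames name) := by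
  unfold Pre_iterateThruComponentNames; infer_instance
def pvWitness_iterateThruComponentNames : String := "AZ"

-- On the empty string A raises IndexError (name[-1]); B returns "A".
def Raises_iterateThruComponentNames (name : String) : Prop := name = ""
instance (name : String) : Decidable (Raises_iterateThruComponentNames name) := by
  unfold Raises_iterateThruComponentNames; infer_instance
def pvRaiseWitness_iterateThruComponentNames : String := ""
def pvRaiseWitnessOut_iterateThruComponentNames : String := "A"

def Spec_iterateThruComponentNames (name : String) (out : String) : Prop :=
  out = iterateThruComponentNames_alt name
instance (name : String) (out : String) : Decidable (Spec_iterateThruComponentNames name out) := by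
  unfold Spec_iterateThruComponentNames; infer_instance

-- ===== CLAIM (what is proved, stated in full; the proofs are below) =====
def Claim_equal_iterateThruComponentNames : Prop :=
  ∀ (name : String), Dom_iterateThruComponentNames name →
    Pre_iterateThruComponentNames name →
    Spec_iterateThruComponentNames name (iterateThruComponentNames name)

def Claim_raises_iterateThruComponentNames : Prop :=
  (∀ (name : String), Dom_iterateThruComponentNames name →
      Raises_iterateThruComponentNames name → ¬ Pre_iterateThruComponentNames name) ∧
  (Dom_iterateThruComponentNames (pvRaiseWitness_iterateThruComponentNames) ∧
   Raises_iterateThruComponentNames (pvRaiseWitness_iterateThruComponentNames) ∧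
   iterateThruComponentNames_alt (pvRaiseWitness_iterateThruComponentNames) =
     pvRaiseWitnessOut_iterateThruComponentNames)

-- ===== LEMMAS AND PROOFS =====

theorem pvInc_eq (c : Char) : pvIncCharA c = pvIncCharB c := rfl

theorem pvLoopA_eq (l : List Char) :
    ∀ (m k : Nat), m = l.length - k → k < l.length →
      pvLoopA l (-(k : Int)) (List.replicate k 'A') m =
        match pvCarryB (l.reverse.drop k) with
        | none => 'A' :: List.replicate l.length 'A'
        | some r => r.reverse ++ List.replicate k 'A' := by
  intro m
  induction m with
  | zero => intro k hm hk; omega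
  | succ m ih =>
    intro k hm hk
    obtain ⟨c, rest, hd⟩ : ∃ c rest, l.reverse.drop k = c :: rest := by
      cases h : l.reverse.drop k with
      | nil =>
        have := congrArg List.length h
        simp at this; omega
      | cons c rest => exact ⟨c, rest, rfl⟩
    have hrest : rest = l.reverse.drop (k + 1) := by
      have := congrArg List.tail hd
      simpa [List.tail_drop] using this.symm
    have hcnt : (-(k : Int) - 1) = -(((k + 1 : Nat)) : Int) := by push_cast; ring
    have hget : PySem.List.pyGet? l (-(k : Int) - 1) = some c := by
      rw [hcnt, PySem.List.pyGet?_neg_natCast l (k + 1) (by omega) (by omega)]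
      have h3 : l.reverse[k]? = some c := by
        have h4 : (List.drop k l.reverse)[0]? = some c := by rw [hd]; rfl
        rw [List.getElem?_drop] at h4
        simpa using h4
      rw [List.getElem?_reverse (by simpa using hk)] at h3
      have : l.length - 1 - k = l.length - (k + 1) := by omega
      rwa [this] at h3
    simp only [pvLoopA, hget]
    by_cases hc : pvIncCharA c = 'A'
    · simp only [List.headD_cons, hc, ne_eq, not_true_eq_false, if_false]
      by_cases hend : k + 1 = l.length
      · have hcond : (-(k : Int) - 1) = -(l.length : Int) := by
          rw [hcnt, hend]
        rw [if_pos hcond, hd]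
        have hrest0 : rest = [] := by
          have := congrArg List.length hrest
          simp at this
          exact List.eq_nil_of_length_eq_zero (by omega)
        rw [hrest0]
        simp [pvCarryB, ← pvInc_eq, hc, ← hend, List.replicate_succ]
      · have hcond : ¬ (-(k : Int) - 1) = -(l.length : Int) := by
          intro h; rw [hcnt] at h
          have : (k + 1 : Nat) = l.length := by exact_mod_cast neg_injective h
          omega
        rw [if_neg hcond, hcnt]
        rw [← List.replicate_succ, ih (k + 1) (by omega) (by omega), hd, ← hrest]
        have hcarry : pvCarryB (c :: rest) = (pvCarryB rest).map (fun r => 'A' :: r) := by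
          simp [pvCarryB, ← pvInc_eq, hc]
        rw [hcarry]
        cases pvCarryB rest with
        | none => rfl
        | some r => simp [List.replicate_succ]
    · simp only [List.headD_cons, hc, ne_eq, not_false_eq_true, if_true]
      rw [hcnt, PySem.List.slice_to_neg_natCast l (k + 1) (by omega), hd]
      have hcarry : pvCarryB (c :: rest) = some (pvIncCharB c :: rest) := by
        simp [pvCarryB, ← pvInc_eq, hc]
      rw [hcarry]
      have htake : l.take (l.length - (k + 1)) = rest.reverse := by
        rw [hrest, List.reverse_drop]
        simp
      simp [htake, pvInc_eq]

theorem main_eq (name : String) (h : name ≠ "") :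
    iterateThruComponentNames name = iterateThruComponentNames_alt name := by
  have hl : 0 < name.toList.length := by
    rw [String.length_toList]
    exact Nat.pos_of_ne_zero fun h0 => h (String.length_eq_zero_iff.mp h0)
  have key := pvLoopA_eq name.toList name.toList.length 0 (by omega) hl
  simp only [Nat.cast_zero, neg_zero, List.replicate_zero, List.drop_zero] at key
  unfold iterateThruComponentNames iterateThruComponentNames_alt
  rw [key]
  cases pvCarryB name.toList.reverse with
  | none => simp [List.replicate_succ]
  | some r => simp

-- ===== VERDICT (by name: the statement is the Claim_ definition above) =====
theorem iterateThruComponentNames_spec : Claim_equal_iterateThruComponentNames := by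
  intro name _ hpre
  exact main_eq name hpre

@[simp] theorem iterateThruComponentNames_raises : Claim_raises_iterateThruComponentNames := by
  unfold Claim_raises_iterateThruComponentNames
  refine ⟨?_, by decide⟩
  intro name _ hr hpre
  exact hpre hr
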